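-- pv_equiv track=rewrite | github.com/DevilCoders/Yandex | cloud/blockstore/support/CLOUDINC-954/tools/repair/__main__.py | align_ranges
-- ===== SOURCE A (Python) =====
-- def align_ranges(ranges):
--     if not ranges:
--         return ranges
--
--     aligned = []
--     for s, n in ranges:
--         l = (s // 1024) * 1024
--         r = ((s + max(1, n) - 1) // 1024 + 1) * 1024
--         aligned.append((l, r - l))
--
--     aligned.sort(key=lambda x: x[0])
--
--     result = [aligned[0]]
--
--     for s in aligned:
--         r = result[-1]
--
--         l1 = r[0]
--         r1 = l1 + r[1]
--
--         l2 = s[0]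
--         r2 = l2 + s[1]
--
--         if r1 < l2:     # separate
--             result.append(s)
--         elif r1 < r2:   # extend
--             result[-1] = (l1, r2 - l1)
--
--     return result
-- ===== SOURCE B (Python) =====
-- def align_ranges(ranges):
--     if not ranges:
--         return ranges
--
--     aligned = []
--     for s, n in ranges:
--         l = (s // 1024) * 1024
--         r = ((s + max(1, n) - 1) // 1024 + 1) * 1024
--         aligned.append((l, r - l))
--
--     aligned.sort(key=lambda x: x[0])
--
--     # Merge back-to-front: walk the aligned ranges from the largest start down,
--     # keeping a stack of already-merged disjoint ranges (top = smallest start);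
--     # each new range pops and absorbs every stacked range it touches.
--     stack = []
--     for l, n in reversed(aligned):
--         while stack and l + n >= stack[-1][0]:
--             tl, tn = stack.pop()
--             n = max(l + n, tl + tn) - l
--         stack.append((l, n))
--     return stack[::-1]
-- ===== Notes on version B (the rewrite author's own statement) =====
-- stated objective: alternative
-- what changed: A merges forward over the sorted aligned ranges by mutating the last slot of the result list; B walks the sorted aligned ranges backwards keeping a stack of already-merged disjoint ranges, popping and absorbing every stacked range the new one touches, then reverses the stack.
import Mathlib
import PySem

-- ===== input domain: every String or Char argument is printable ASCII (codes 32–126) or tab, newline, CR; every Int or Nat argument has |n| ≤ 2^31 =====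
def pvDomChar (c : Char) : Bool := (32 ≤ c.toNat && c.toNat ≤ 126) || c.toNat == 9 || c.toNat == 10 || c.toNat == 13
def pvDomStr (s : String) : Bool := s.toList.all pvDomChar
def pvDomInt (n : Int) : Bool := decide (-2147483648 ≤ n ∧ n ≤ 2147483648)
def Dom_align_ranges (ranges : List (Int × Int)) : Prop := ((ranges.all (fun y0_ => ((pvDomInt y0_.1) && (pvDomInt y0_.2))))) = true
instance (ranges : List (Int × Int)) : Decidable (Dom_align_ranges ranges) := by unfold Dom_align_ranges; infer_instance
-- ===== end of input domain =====

-- B merges the aligned ranges back-to-front with a stack that absorbs every touched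
-- range, instead of A's forward scan mutating the last result slot (objective: alternative).

-- ===== PORT A =====
-- align one (start, count) range to 1024-block boundaries (shared by both pythons verbatim)
def pvAlign (p : Int × Int) : Int × Int :=
  let l := PySem.Int.floordiv p.1 1024 * 1024
  let r := (PySem.Int.floordiv (p.1 + max 1 p.2 - 1) 1024 + 1) * 1024
  (l, r - l)

-- the body of A's second loop: result[-1] is getLastD (result is always nonempty),
-- result[-1] = v is dropLast ++ [v], result.append(s) is ++ [s]
def pvStepA (res : List (Int × Int)) (s : Int × Int) : List (Int × Int) :=
  let r := res.getLastD (0, 0)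
  let l1 := r.1
  let r1 := l1 + r.2
  let l2 := s.1
  let r2 := l2 + s.2
  if r1 < l2 then res ++ [s]
  else if r1 < r2 then res.dropLast ++ [(l1, r2 - l1)]
  else res

def align_ranges (ranges : List (Int × Int)) : List (Int × Int) :=
  if ranges = [] then ranges
  else
    let aligned := PySem.List.sorted (ranges.map pvAlign) (fun x => x.1)
    aligned.foldl pvStepA [aligned.headD (0, 0)]

-- ===== PORT B =====
-- B's inner while loop: pop and absorb every stacked range the new range touches,
-- then push; the stack (top = smallest start) is the recursion's list head
def pvAbsorb : Int × Int → List (Int × Int) → List (Int × Int)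
  | p, [] => [p]
  | p, q :: t =>
    if p.1 + p.2 < q.1 then p :: q :: t
    else pvAbsorb (p.1, max (p.1 + p.2) (q.1 + q.2) - p.1) t

-- B's `for l, n in reversed(aligned)` driving the stack, with the final reversal,
-- is exactly a right fold of pvAbsorb over the sorted aligned list
def align_ranges_alt (ranges : List (Int × Int)) : List (Int × Int) :=
  if ranges = [] then ranges
  else
    let aligned := PySem.List.sorted (ranges.map pvAlign) (fun x => x.1)
    aligned.foldr pvAbsorb []

-- ===== PRECONDITION & SPEC =====
def Spec_align_ranges (ranges : List (Int × Int)) (out : List (Int × Int)) : Prop := out = align_ranges_alt ranges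
instance (ranges : List (Int × Int)) (out : List (Int × Int)) : Decidable (Spec_align_ranges ranges out) := by unfold Spec_align_ranges; infer_instance

-- ===== CLAIM (what is proved, stated in full; the proofs are below) =====
def Claim_equal_align_ranges : Prop := ∀ (ranges : List (Int × Int)), Dom_align_ranges ranges → Spec_align_ranges ranges (align_ranges ranges)

-- ===== LEMMAS AND PROOFS =====

-- a list of pairwise-separated nonempty half-open intervals (the canonical merged form)
def PVNorm (l : List (Int × Int)) : Prop :=
  List.Pairwise (fun p q : Int × Int => p.1 + p.2 < q.1) l ∧ ∀ p ∈ l, 0 < p.2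

-- point x is covered by some interval of the list
def PVCov (l : List (Int × Int)) (x : Int) : Prop := ∃ p ∈ l, p.1 ≤ x ∧ x < p.1 + p.2

theorem pvCovCons (p : Int × Int) (l : List (Int × Int)) (x : Int) :
    PVCov (p :: l) x ↔ (p.1 ≤ x ∧ x < p.1 + p.2) ∨ PVCov l x := by
  simp [PVCov]

-- two pairwise-separated lists of nonempty intervals covering the same points are equal
theorem pvUnique : ∀ (a b : List (Int × Int)), PVNorm a → PVNorm b →
    (∀ x, PVCov a x ↔ PVCov b x) → a = b := by
  intro a
  induction a with
  | nil =>
    intro b _ hb hcov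
    cases b with
    | nil => rfl
    | cons q t =>
      exfalso
      have hq2 : 0 < q.2 := hb.2 q (by simp)
      have h0 := (hcov q.1).mpr ⟨q, by simp, le_refl _, by omega⟩
      simp [PVCov] at h0
  | cons p t1 ih =>
    intro b ha hb hcov
    have hp2 : 0 < p.2 := ha.2 p (by simp)
    have hgap1 : ∀ r ∈ t1, p.1 + p.2 < r.1 := (List.pairwise_cons.mp ha.1).1
    cases b with
    | nil =>
      exfalso
      have h0 := (hcov p.1).mp ⟨p, by simp, le_refl _, by omega⟩
      simp [PVCov] at h0
    | cons q t2 =>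
      have hq2 : 0 < q.2 := hb.2 q (by simp)
      have hgap2 : ∀ r ∈ t2, q.1 + q.2 < r.1 := (List.pairwise_cons.mp hb.1).1
      have hqp : q.1 ≤ p.1 := by
        obtain ⟨r, hrb, hr1, hr2⟩ := (hcov p.1).mp ⟨p, by simp, le_refl _, by omega⟩
        rcases List.mem_cons.mp hrb with h | h
        · subst h; exact hr1
        · have := hgap2 r h; omega
      have hpq : p.1 ≤ q.1 := by
        obtain ⟨r, hra, hr1, hr2⟩ := (hcov q.1).mpr ⟨q, by simp, le_refl _, by omega⟩
        rcases List.mem_cons.mp hra with h | h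
        · subst h; exact hr1
        · have := hgap1 r h; omega
      have h1 : p.1 = q.1 := le_antisymm hpq hqp
      have h2 : p.2 = q.2 := by
        by_contra hne
        rcases lt_or_gt_of_ne hne with hlt | hgt
        · obtain ⟨r, hra, hr1, hr2⟩ := (hcov (p.1 + p.2)).mpr ⟨q, by simp, by omega, by omega⟩
          rcases List.mem_cons.mp hra with h | h
          · subst h; omega
          · have := hgap1 r h; omega
        · obtain ⟨r, hrb, hr1, hr2⟩ := (hcov (q.1 + q.2)).mp ⟨p, by simp, by omega, by omega⟩
          rcases List.mem_cons.mp hrb with h | h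
          · subst h; omega
          · have := hgap2 r h; omega
      have hta : PVNorm t1 := ⟨(List.pairwise_cons.mp ha.1).2, fun r hr => ha.2 r (by simp [hr])⟩
      have htb : PVNorm t2 := ⟨(List.pairwise_cons.mp hb.1).2, fun r hr => hb.2 r (by simp [hr])⟩
      have hcovt : ∀ x, PVCov t1 x ↔ PVCov t2 x := by
        intro x
        constructor
        · rintro ⟨r, hr, hx1, hx2⟩
          have hgr := hgap1 r hr
          obtain ⟨r', hr', h1', h2'⟩ := (hcov x).mp ⟨r, by simp [hr], hx1, hx2⟩
          rcases List.mem_cons.mp hr' with h | h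
          · subst h; omega
          · exact ⟨r', h, h1', h2'⟩
        · rintro ⟨r, hr, hx1, hx2⟩
          have hgr := hgap2 r hr
          obtain ⟨r', hr', h1', h2'⟩ := (hcov x).mpr ⟨r, by simp [hr], hx1, hx2⟩
          rcases List.mem_cons.mp hr' with h | h
          · subst h; omega
          · exact ⟨r', h, h1', h2'⟩
      have hpqeq : p = q := by
        cases p; cases q; simp_all
      rw [hpqeq, ih t2 hta htb hcovt]

-- A's merge loop as structural recursion on the remaining list
def pvMergeA : Int × Int → List (Int × Int) → List (Int × Int)
  | cur, [] => [cur]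
  | cur, s :: t =>
    if cur.1 + cur.2 < s.1 then cur :: pvMergeA s t
    else if cur.1 + cur.2 < s.1 + s.2 then pvMergeA (cur.1, s.1 + s.2 - cur.1) t
    else pvMergeA cur t

theorem pvFoldl_eq_mergeA : ∀ (xs done : List (Int × Int)) (cur : Int × Int),
    List.foldl pvStepA (done ++ [cur]) xs = done ++ pvMergeA cur xs := by
  intro xs
  induction xs with
  | nil => intro done cur; simp [pvMergeA]
  | cons s t ih =>
    intro done cur
    show List.foldl pvStepA (pvStepA (done ++ [cur]) s) t = done ++ pvMergeA cur (s :: t)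
    simp only [pvStepA, pvMergeA, List.getLastD_concat, List.dropLast_concat]
    by_cases h1 : cur.1 + cur.2 < s.1
    · simp only [if_pos h1]
      rw [show (done ++ [cur]) ++ [s] = (done ++ [cur]) ++ [s] from rfl, ih ((done ++ [cur])) s]
      simp
    · simp only [if_neg h1]
      by_cases h2 : cur.1 + cur.2 < s.1 + s.2
      · simp only [if_pos h2, ih done]
      · simp only [if_neg h2, ih done]

theorem pvMergeA_spec : ∀ (xs : List (Int × Int)) (cur : Int × Int),
    (∀ p ∈ xs, cur.1 ≤ p.1) →
    List.Pairwise (fun p q : Int × Int => p.1 ≤ q.1) xs →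
    0 < cur.2 → (∀ p ∈ xs, 0 < p.2) →
    PVNorm (pvMergeA cur xs) ∧
    (∃ m tl, pvMergeA cur xs = (cur.1, m) :: tl ∧ cur.2 ≤ m) ∧
    (∀ x, PVCov (pvMergeA cur xs) x ↔ PVCov (cur :: xs) x) := by
  intro xs
  induction xs with
  | nil =>
    intro cur _ _ hc _
    refine ⟨⟨by simp [pvMergeA], ?_⟩, ⟨cur.2, [], by simp [pvMergeA], le_refl _⟩, ?_⟩
    · intro p hp
      simp [pvMergeA] at hp
      subst hp; exact hc
    · intro x; simp [pvMergeA, PVCov]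
  | cons s t ih =>
    intro cur hlb hsort hc hpos
    have hst : s.1 ≤ cur.1 + cur.2 ∨ cur.1 + cur.2 < s.1 := by omega
    have hlb_t : ∀ p ∈ t, s.1 ≤ p.1 := fun p hp => (List.pairwise_cons.mp hsort).1 p hp
    have hsort_t : List.Pairwise (fun p q : Int × Int => p.1 ≤ q.1) t :=
      (List.pairwise_cons.mp hsort).2
    have hpos_s : 0 < s.2 := hpos s (by simp)
    have hpos_t : ∀ p ∈ t, 0 < p.2 := fun p hp => hpos p (by simp [hp])
    have hcs : cur.1 ≤ s.1 := hlb s (by simp)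
    by_cases h1 : cur.1 + cur.2 < s.1
    · -- separate
      obtain ⟨hnorm, ⟨m, tl, heq, hm⟩, hcov⟩ := ih s hlb_t hsort_t hpos_s hpos_t
      have hres : pvMergeA cur (s :: t) = cur :: pvMergeA s t := by
        simp [pvMergeA, h1]
      refine ⟨⟨?_, ?_⟩, ⟨cur.2, pvMergeA s t, by simp [hres], le_refl _⟩, ?_⟩
      · rw [hres]
        refine List.pairwise_cons.mpr ⟨?_, hnorm.1⟩
        intro q hq
        rw [heq] at hq hnorm
        rcases List.mem_cons.mp hq with h | h
        · subst h; exact h1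
        · have := (List.pairwise_cons.mp hnorm.1).1 q h
          have hm0 : 0 < m := lt_of_lt_of_le hpos_s hm
          omega
      · rw [hres]; intro p hp
        rcases List.mem_cons.mp hp with h | h
        · subst h; exact hc
        · exact hnorm.2 p h
      · intro x
        rw [hres, pvCovCons, hcov x, pvCovCons, pvCovCons, pvCovCons s t x]
    · by_cases h2 : cur.1 + cur.2 < s.1 + s.2
      · -- extend
        have hres : pvMergeA cur (s :: t) = pvMergeA (cur.1, s.1 + s.2 - cur.1) t := by
          simp [pvMergeA, h1, h2]
        have hlb' : ∀ p ∈ t, (cur.1, s.1 + s.2 - cur.1).1 ≤ p.1 := by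
          intro p hp; exact le_trans hcs (hlb_t p hp)
        have hc' : 0 < (cur.1, s.1 + s.2 - cur.1).2 := by simp; omega
        obtain ⟨hnorm, ⟨m, tl, heq, hm⟩, hcov⟩ := ih (cur.1, s.1 + s.2 - cur.1) hlb' hsort_t hc' hpos_t
        refine ⟨by rwa [hres], ⟨m, tl, by rw [hres]; exact heq, by simp at hm; omega⟩, ?_⟩
        intro x
        rw [hres, hcov x, pvCovCons, pvCovCons, pvCovCons]
        constructor
        · rintro (h | h)
          · simp at h; omega
          · tauto
        · rintro (h | h | h)
          · left; simp; omega
          · left; simp; omega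
          · tauto
      · -- skip
        have hres : pvMergeA cur (s :: t) = pvMergeA cur t := by
          simp [pvMergeA, h1, h2]
        have hlb' : ∀ p ∈ t, cur.1 ≤ p.1 := fun p hp => le_trans hcs (hlb_t p hp)
        obtain ⟨hnorm, hshape, hcov⟩ := ih cur hlb' hsort_t hc hpos_t
        refine ⟨by rwa [hres], by rw [hres]; exact hshape, ?_⟩
        intro x
        rw [hres, hcov x, pvCovCons, pvCovCons, pvCovCons]
        constructor
        · rintro (h | h) <;> tauto
        · rintro (h | h | h)
          · tauto
          · left; omega
          · tauto

theorem pvAbsorb_spec : ∀ (M : List (Int × Int)) (p : Int × Int),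
    PVNorm M → 0 < p.2 → (∀ q ∈ M, p.1 ≤ q.1) →
    PVNorm (pvAbsorb p M) ∧
    (∃ m tl, pvAbsorb p M = (p.1, m) :: tl ∧ p.2 ≤ m ∧ ∀ q ∈ tl, q ∈ M) ∧
    (∀ x, PVCov (pvAbsorb p M) x ↔ ((p.1 ≤ x ∧ x < p.1 + p.2) ∨ PVCov M x)) := by
  intro M
  induction M with
  | nil =>
    intro p _ hp _
    refine ⟨⟨by simp [pvAbsorb], ?_⟩, ⟨p.2, [], by simp [pvAbsorb], le_refl _, by simp⟩, ?_⟩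
    · intro q hq
      simp [pvAbsorb] at hq
      subst hq; exact hp
    · intro x; simp [pvAbsorb, PVCov]
  | cons q t ih =>
    intro p hM hp hlb
    have hMt : PVNorm t := ⟨(List.pairwise_cons.mp hM.1).2, fun r hr => hM.2 r (by simp [hr])⟩
    have hgap : ∀ r ∈ t, q.1 + q.2 < r.1 := (List.pairwise_cons.mp hM.1).1
    have hq2 : 0 < q.2 := hM.2 q (by simp)
    have hpq : p.1 ≤ q.1 := hlb q (by simp)
    by_cases h1 : p.1 + p.2 < q.1
    · -- push: new range ends before the stack top begins
      have hres : pvAbsorb p (q :: t) = p :: q :: t := by simp [pvAbsorb, h1]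
      refine ⟨⟨?_, ?_⟩, ⟨p.2, q :: t, by simp [hres], le_refl _, fun r hr => hr⟩, ?_⟩
      · rw [hres]
        refine List.pairwise_cons.mpr ⟨?_, hM.1⟩
        intro r hr
        rcases List.mem_cons.mp hr with h | h
        · subst h; exact h1
        · have := hgap r h; omega
      · rw [hres]
        intro r hr
        rcases List.mem_cons.mp hr with h | h
        · subst h; exact hp
        · exact hM.2 r h
      · intro x; rw [hres, pvCovCons]
    · -- absorb the stack top and continue
      have hres : pvAbsorb p (q :: t) = pvAbsorb (p.1, max (p.1 + p.2) (q.1 + q.2) - p.1) t := by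
        simp [pvAbsorb, h1]
      have hp' : 0 < (p.1, max (p.1 + p.2) (q.1 + q.2) - p.1).2 := by simp; omega
      have hlb' : ∀ r ∈ t, (p.1, max (p.1 + p.2) (q.1 + q.2) - p.1).1 ≤ r.1 := by
        intro r hr; have := hgap r hr; simp; omega
      obtain ⟨hnorm, ⟨m, tl, heq, hm, htl⟩, hcov⟩ := ih (p.1, max (p.1 + p.2) (q.1 + q.2) - p.1) hMt hp' hlb'
      refine ⟨by rwa [hres], ⟨m, tl, by rw [hres]; exact heq, by simp at hm; omega,
        fun r hr => by simp [htl r hr]⟩, ?_⟩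
      intro x
      rw [hres, hcov x, pvCovCons]
      simp only []
      constructor
      · rintro (h | h)
        · simp at h; omega
        · tauto
      · rintro (h | h | h)
        · left; simp; omega
        · left; simp; omega
        · tauto

theorem pvFoldr_spec : ∀ (xs : List (Int × Int)),
    List.Pairwise (fun p q : Int × Int => p.1 ≤ q.1) xs → (∀ p ∈ xs, 0 < p.2) →
    PVNorm (xs.foldr pvAbsorb []) ∧
    (∀ q ∈ xs.foldr pvAbsorb [], ∃ p ∈ xs, p.1 ≤ q.1) ∧
    (∀ x, PVCov (xs.foldr pvAbsorb []) x ↔ PVCov xs x) := by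
  intro xs
  induction xs with
  | nil => exact fun _ _ => ⟨⟨by simp, by simp⟩, by simp, fun x => by simp [PVCov]⟩
  | cons s t ih =>
    intro hsort hpos
    obtain ⟨hnorm, hstarts, hcov⟩ := ih (List.pairwise_cons.mp hsort).2
      (fun p hp => hpos p (by simp [hp]))
    have hlb : ∀ q ∈ t.foldr pvAbsorb [], s.1 ≤ q.1 := by
      intro q hq
      obtain ⟨p, hpt, hple⟩ := hstarts q hq
      exact le_trans ((List.pairwise_cons.mp hsort).1 p hpt) hple
    obtain ⟨hnorm', ⟨m, tl, heq, hm, htl⟩, hcov'⟩ :=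
      pvAbsorb_spec (t.foldr pvAbsorb []) s hnorm (hpos s (by simp)) hlb
    refine ⟨hnorm', ?_, ?_⟩
    · intro q hq
      rw [List.foldr_cons, heq] at hq
      rcases List.mem_cons.mp hq with h | h
      · exact ⟨s, by simp, by simp [h]⟩
      · obtain ⟨p, hpt, hple⟩ := hstarts q (htl q h)
        exact ⟨p, by simp [hpt], hple⟩
    · intro x
      rw [List.foldr_cons, hcov' x, hcov x, pvCovCons]

theorem pvAlign_pos (p : Int × Int) : 0 < (pvAlign p).2 := by
  have h : (0:Int) < 1024 := by norm_num
  simp only [pvAlign, PySem.Int.floordiv_eq_ediv_of_pos h]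
  omega

-- the two merge passes agree on the sorted aligned list: both produce the unique
-- pairwise-separated cover of the same set of points
theorem pvMain (ranges : List (Int × Int)) (hr : ranges ≠ []) :
    List.foldl pvStepA [(PySem.List.sorted (ranges.map pvAlign) (fun x => x.1)).headD (0, 0)]
      (PySem.List.sorted (ranges.map pvAlign) (fun x => x.1))
    = (PySem.List.sorted (ranges.map pvAlign) (fun x => x.1)).foldr pvAbsorb [] := by
  set L := PySem.List.sorted (ranges.map pvAlign) (fun x => x.1) with hL
  obtain ⟨a0, rest, hC⟩ : ∃ a0 rest, L = a0 :: rest := by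
    cases hE : L with
    | nil =>
      exfalso
      exact hr (by simpa using (PySem.List.sorted_eq_nil_iff (ranges.map pvAlign) (fun x => x.1) false).mp (hL ▸ hE))
    | cons a0 rest => exact ⟨a0, rest, rfl⟩
  have hmem : ∀ p ∈ L, p ∈ ranges.map pvAlign := by
    intro p hp
    exact (PySem.List.mem_sorted (ranges.map pvAlign) (fun x => x.1) false p).mp (hL ▸ hp)
  have hpos : ∀ p ∈ L, 0 < p.2 := by
    intro p hp
    obtain ⟨o, _, ho⟩ := List.mem_map.mp (hmem p hp)
    exact ho ▸ pvAlign_pos o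
  have hsort : List.Pairwise (fun p q : Int × Int => p.1 ≤ q.1) L :=
    hL ▸ PySem.List.sorted_pairwise (ranges.map pvAlign) (fun x => x.1)
  have hlow : ∀ p ∈ L, a0.1 ≤ p.1 := by
    intro p hp
    exact PySem.List.key_head_sorted_le (ranges.map pvAlign) (fun x => x.1) (hL ▸ hC) p (hmem p hp)
  have ha0L : a0 ∈ L := by rw [hC]; simp
  have hhead : L.headD (0, 0) = a0 := by rw [hC]; rfl
  obtain ⟨hnA, _, hcA⟩ := pvMergeA_spec L a0 hlow hsort (hpos a0 ha0L) hpos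
  obtain ⟨hnB, _, hcB⟩ := pvFoldr_spec L hsort hpos
  have hcA' : ∀ x, PVCov (pvMergeA a0 L) x ↔ PVCov L x := by
    intro x
    rw [hcA x, pvCovCons]
    constructor
    · rintro (h | h)
      · exact ⟨a0, ha0L, h⟩
      · exact h
    · exact Or.inr
  rw [hhead, show [a0] = [] ++ [a0] from rfl, pvFoldl_eq_mergeA L [] a0, List.nil_append]
  exact pvUnique (pvMergeA a0 L) (L.foldr pvAbsorb []) hnA hnB
    (fun x => (hcA' x).trans (hcB x).symm)

-- ===== VERDICT (by name: the statement is the Claim_ definition above) =====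
theorem align_ranges_spec : Claim_equal_align_ranges := by
  unfold Claim_equal_align_ranges
  intro ranges _
  unfold Spec_align_ranges align_ranges align_ranges_alt
  by_cases hr : ranges = []
  · simp [hr]
  · simp only [if_neg hr]
    exact pvMain ranges hr
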